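-- pv_equiv track=rewrite | github.com/Rishabh-Codes27/tally-so-clone | backend/app/services/submission_validation.py | _matches_allowed_type
-- ===== SOURCE A (Python) =====
-- def _matches_allowed_type(file_type: str, allowed: list[str], file_name: str | None) -> bool:
--     if not allowed:
--         return True
--     lower_name = (file_name or "").lower()
--     ext = lower_name.split(".")[-1] if "." in lower_name else ""
--     for entry in allowed:
--         normalized = entry.strip().lower()
--         if not normalized:
--             continue
--         if normalized.endswith("/*"):
--             prefix = normalized[:-1]
--             if file_type.startswith(prefix):
--                 return True
--             continue
--         if "/" in normalized:
--             if file_type == normalized: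
--                 return True
--             continue
--         if not ext:
--             continue
--         if normalized.startswith("."):
--             if f".{ext}" == normalized:
--                 return True
--             continue
--         if ext == normalized:
--             return True
--     return False
-- ===== SOURCE B (Python) =====
-- def _matches_allowed_type(file_type: str, allowed: list[str], file_name: str | None) -> bool:
--     if not allowed:
--         return True
--     lower_name = (file_name or "").lower()
--     ext = lower_name.split(".")[-1] if "." in lower_name else ""
--     prefixes = []
--     exact = set()
--     dot_exts = set()
--     bare_exts = set()
--     for entry in allowed:
--         normalized = entry.strip().lower()
--         if not normalized:
--             continue
--         if normalized.endswith("/*"):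
--             prefixes.append(normalized[:-1])
--         elif "/" in normalized:
--             exact.add(normalized)
--         elif normalized.startswith("."):
--             dot_exts.add(normalized)
--         else:
--             bare_exts.add(normalized)
--     if file_type in exact:
--         return True
--     if any(file_type.startswith(p) for p in prefixes):
--         return True
--     if ext and (f".{ext}" in dot_exts or ext in bare_exts):
--         return True
--     return False
-- ===== Notes on version B (the rewrite author's own statement) =====
-- stated objective: alternative
-- what changed: A scans the allowed list once per call with an ordered if/elif chain and early return per entry; B first classifies all entries into four pattern buckets (wildcard prefixes, exact MIME set, dotted-extension set, bare-extension set) in one pass and then answers with membership/prefix tests against the buckets.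
import Mathlib
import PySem

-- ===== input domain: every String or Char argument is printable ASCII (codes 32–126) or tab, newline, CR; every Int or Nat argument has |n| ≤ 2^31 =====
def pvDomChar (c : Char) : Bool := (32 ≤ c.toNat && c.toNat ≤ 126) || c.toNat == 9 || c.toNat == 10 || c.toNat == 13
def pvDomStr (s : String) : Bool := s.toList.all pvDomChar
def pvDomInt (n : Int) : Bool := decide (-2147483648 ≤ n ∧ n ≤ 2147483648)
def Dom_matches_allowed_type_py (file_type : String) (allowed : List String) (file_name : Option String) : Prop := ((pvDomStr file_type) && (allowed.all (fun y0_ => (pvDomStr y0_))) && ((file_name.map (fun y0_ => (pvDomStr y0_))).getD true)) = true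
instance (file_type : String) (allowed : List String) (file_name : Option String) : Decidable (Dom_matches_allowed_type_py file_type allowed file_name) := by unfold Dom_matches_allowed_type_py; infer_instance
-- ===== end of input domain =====

-- B replaces A's single loop of ordered per-entry checks by one classification pass into
-- four pattern buckets (wildcard prefixes / exact MIMEs / dotted extensions / bare extensions)
-- followed by set-membership tests; objective: alternative structure, proved equal.

-- ===== PORT A =====

-- shared by both ports (identical line in both Pythons): ext = (file_name or "").lower().split(".")[-1] if "." in it else ""
def pvExt (file_name : Option String) : String :=
  let lowerName := PySem.Str.lower (file_name.getD "")
  if PySem.Str.isIn "." lowerName then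
    ((PySem.List.pyGet? ((PySem.Str.split? lowerName ".").getD []) (-1)).getD "")
  else ""

def pvLoopA (file_type ext : String) : List String → Bool
  | [] => false
  | entry :: rest =>
    let normalized := PySem.Str.lower (PySem.Str.strip entry)
    if normalized = "" then pvLoopA file_type ext rest
    else if PySem.Str.endswith normalized "/*" then
      (if PySem.Str.startswith file_type (PySem.Str.slice normalized none (some (-1))) then true
       else pvLoopA file_type ext rest)
    else if PySem.Str.isIn "/" normalized then
      (if file_type == normalized then true else pvLoopA file_type ext rest)
    else if ext = "" then pvLoopA file_type ext rest
    else if PySem.Str.startswith normalized "." then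
      (if ("." ++ ext) == normalized then true else pvLoopA file_type ext rest)
    else if ext == normalized then true
    else pvLoopA file_type ext rest

def matches_allowed_type_py (file_type : String) (allowed : List String) (file_name : Option String) : Bool :=
  if allowed = [] then true
  else pvLoopA file_type (pvExt file_name) allowed

-- ===== PORT B =====

-- bucket state: (wildcard prefixes, exact MIME set, dotted-extension set, bare-extension set)
def pvStepB (st : List String × PySem.Set String × PySem.Set String × PySem.Set String)
    (entry : String) : List String × PySem.Set String × PySem.Set String × PySem.Set String :=
  let n := PySem.Str.lower (PySem.Str.strip entry)
  if n = "" then st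
  else if PySem.Str.endswith n "/*" then
    (st.1 ++ [PySem.Str.slice n none (some (-1))], st.2.1, st.2.2.1, st.2.2.2)
  else if PySem.Str.isIn "/" n then (st.1, PySem.Set.add st.2.1 n, st.2.2.1, st.2.2.2)
  else if PySem.Str.startswith n "." then (st.1, st.2.1, PySem.Set.add st.2.2.1 n, st.2.2.2)
  else (st.1, st.2.1, st.2.2.1, PySem.Set.add st.2.2.2 n)

def pvTestB (file_type ext : String)
    (st : List String × PySem.Set String × PySem.Set String × PySem.Set String) : Bool :=
  PySem.Set.contains st.2.1 file_type
  || st.1.any (fun p => PySem.Str.startswith file_type p)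
  || ((!(ext == "")) && (PySem.Set.contains st.2.2.1 ("." ++ ext) || PySem.Set.contains st.2.2.2 ext))

def matches_allowed_type_py_alt (file_type : String) (allowed : List String) (file_name : Option String) : Bool :=
  if allowed = [] then true
  else pvTestB file_type (pvExt file_name) (allowed.foldl pvStepB ([], [], [], []))

-- ===== PRECONDITION & SPEC =====
def Spec_matches_allowed_type_py (file_type : String) (allowed : List String) (file_name : Option String) (out : Bool) : Prop := out = matches_allowed_type_py_alt file_type allowed file_name
instance (file_type : String) (allowed : List String) (file_name : Option String) (out : Bool) : Decidable (Spec_matches_allowed_type_py file_type allowed file_name out) := by unfold Spec_matches_allowed_type_py; infer_instance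

-- ===== CLAIM (what is proved, stated in full; the proofs are below) =====
def Claim_equal_matches_allowed_type_py : Prop := ∀ (file_type : String) (allowed : List String) (file_name : Option String), Dom_matches_allowed_type_py file_type allowed file_name → Spec_matches_allowed_type_py file_type allowed file_name (matches_allowed_type_py file_type allowed file_name)

-- ===== LEMMAS AND PROOFS =====

-- the per-entry match A's loop decides for a normalized entry n
def pvMatchE (file_type ext n : String) : Bool :=
  if PySem.Str.endswith n "/*" then PySem.Str.startswith file_type (PySem.Str.slice n none (some (-1)))
  else if PySem.Str.isIn "/" n then file_type == n
  else if PySem.Str.startswith n "." then (!(ext == "")) && (("." ++ ext) == n)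
  else (!(ext == "")) && (ext == n)

theorem pvMatchE_empty (ft ext : String) : pvMatchE ft ext "" = false := by
  have h1 : PySem.Chars.endswith ([] : List Char) ['/', '*'] = false := by decide
  have h2 : PySem.Chars.isIn ['/'] ([] : List Char) = false := by decide
  have h3 : PySem.Chars.startswith ([] : List Char) ['.'] = false := by decide
  by_cases h : ext = "" <;> simp [pvMatchE, h1, h2, h3, h]

theorem pvLoopA_eq_any (ft ext : String) (l : List String) :
    pvLoopA ft ext l = l.any (fun e => pvMatchE ft ext (PySem.Str.lower (PySem.Str.strip e))) := by
  induction l with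
  | nil => rfl
  | cons e rest ih =>
    simp only [pvLoopA, List.any_cons]
    by_cases h0 : PySem.Str.lower (PySem.Str.strip e) = ""
    · rw [if_pos h0, h0, pvMatchE_empty, ih, Bool.false_or]
    · rw [if_neg h0]
      split_ifs with h1 h2 h3 h4 h5 h6 h7 h8 <;>
        simp_all [pvMatchE, Bool.and_comm]

theorem contains_add (s : PySem.Set String) (x y : String) :
    PySem.Set.contains (PySem.Set.add s x) y = (PySem.Set.contains s y || y == x) := by
  rw [PySem.Set.add_eq_ite]
  split_ifs with h
  · by_cases hyx : y = x
    · subst hyx; simp [h]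
    · simp [hyx]
  · simp [PySem.Set.contains, Bool.beq_eq_decide_eq]

theorem pv_shuffle1 (a b g x m y : Bool) :
    (a || b || (g && ((x || m) || y))) = ((a || b || (g && (x || y))) || (g && m)) := by
  cases a <;> cases b <;> cases g <;> cases x <;> cases m <;> cases y <;> rfl

theorem pv_shuffle2 (a b g x y m : Bool) :
    (a || b || (g && (x || (y || m)))) = ((a || b || (g && (x || y))) || (g && m)) := by
  cases a <;> cases b <;> cases g <;> cases x <;> cases m <;> cases y <;> rfl

theorem pv_shuffle3 (a m b g x y : Bool) :
    ((a || m) || b || (g && (x || y))) = ((a || b || (g && (x || y))) || m) := by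
  cases a <;> cases b <;> cases g <;> cases x <;> cases m <;> cases y <;> rfl

theorem pv_shuffle4 (a b m g : Bool) :
    (a || (b || m) || g) = ((a || b || g) || m) := by
  cases a <;> cases b <;> cases g <;> cases m <;> rfl

theorem pvTestB_step (ft ext : String)
    (st : List String × PySem.Set String × PySem.Set String × PySem.Set String) (e : String) :
    pvTestB ft ext (pvStepB st e)
      = (pvTestB ft ext st || pvMatchE ft ext (PySem.Str.lower (PySem.Str.strip e))) := by
  obtain ⟨ps, ex, dx, bx⟩ := st
  simp only [pvStepB]
  by_cases h0 : PySem.Str.lower (PySem.Str.strip e) = ""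
  · rw [if_pos h0, h0, pvMatchE_empty, Bool.or_false]
  · rw [if_neg h0]
    simp only [pvMatchE]
    split_ifs with h1 h2 h3
    · simp only [pvTestB, List.any_append, List.any_cons, List.any_nil, Bool.or_false]
      exact pv_shuffle4 _ _ _ _
    · simp only [pvTestB, contains_add]
      exact pv_shuffle3 _ _ _ _ _ _
    · simp only [pvTestB, contains_add]
      exact pv_shuffle1 _ _ _ _ _ _
    · simp only [pvTestB, contains_add]
      exact pv_shuffle2 _ _ _ _ _ _

theorem pvTestB_foldl (ft ext : String) (l : List String)
    (st : List String × PySem.Set String × PySem.Set String × PySem.Set String) :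
    pvTestB ft ext (l.foldl pvStepB st)
      = (pvTestB ft ext st || l.any (fun e => pvMatchE ft ext (PySem.Str.lower (PySem.Str.strip e)))) := by
  induction l generalizing st with
  | nil => simp
  | cons e rest ih =>
    simp only [List.foldl_cons, List.any_cons, ih, pvTestB_step, Bool.or_assoc]

theorem pvTestB_init (ft ext : String) : pvTestB ft ext ([], [], [], []) = false := by
  simp [pvTestB, PySem.Set.contains]

-- ===== VERDICT (by name: the statement is the Claim_ definition above) =====
theorem matches_allowed_type_py_spec : Claim_equal_matches_allowed_type_py := by
  intro ft allowed fn _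
  unfold Spec_matches_allowed_type_py matches_allowed_type_py matches_allowed_type_py_alt
  by_cases h : allowed = []
  · simp [h]
  · rw [if_neg h, if_neg h, pvLoopA_eq_any, pvTestB_foldl, pvTestB_init, Bool.false_or]
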